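-- pv_equiv track=rewrite | github.com/SelinaYan0514/CS111--Intro_to_Computer_Science_I | PS_02/ps2pr5.py | process
-- ===== SOURCE A (Python) =====
-- def process(vals,x):
--     """ return a new list in which each element of the original list that is
--     larger than x is replaced with a 0
--         inputs: a list of 0 or more integers vals and a single integer x
--     """
--     if vals == []:
--         return []
--     else:
--         rest_process = process(vals[1:],x)
--         if vals[0] > x:
--             return [0] + rest_process
--         else:
--             return [vals[0]] + rest_process
-- ===== SOURCE B (Python) =====
-- def process(vals, x):
--     result = []
--     for v in vals:
--         if v > x:
--             result.append(0)
--         else: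
--             result.append(v)
--     return result
-- ===== Notes on version B (the rewrite author's own statement) =====
-- stated objective: faster
-- what changed: Replaced A's recursion with head/tail reconstruction (each call copies the tail via vals[1:]) by a single forward loop appending to an accumulator.
import Mathlib
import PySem

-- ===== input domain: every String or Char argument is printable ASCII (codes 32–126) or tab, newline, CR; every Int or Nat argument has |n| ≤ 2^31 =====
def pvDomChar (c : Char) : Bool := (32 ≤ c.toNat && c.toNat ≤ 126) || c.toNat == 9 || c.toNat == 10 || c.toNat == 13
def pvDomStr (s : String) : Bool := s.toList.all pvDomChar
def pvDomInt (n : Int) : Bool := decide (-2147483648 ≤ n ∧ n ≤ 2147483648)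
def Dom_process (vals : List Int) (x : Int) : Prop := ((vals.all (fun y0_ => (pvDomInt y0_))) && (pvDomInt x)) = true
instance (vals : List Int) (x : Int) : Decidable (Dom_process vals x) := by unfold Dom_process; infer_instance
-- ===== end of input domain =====

-- B replaces A's recursion (head/tail reconstruction) with a forward loop over an accumulator; same result.

-- ===== PORT A =====
-- literal transliteration of A's recursion: empty check, recurse on the tail, prepend 0 or the head
def process (vals : List Int) (x : Int) : List Int :=
  match vals with
  | [] => []
  | v :: rest =>
    let rest_process := process rest x
    if v > x then [0] ++ rest_process else [v] ++ rest_process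

-- ===== PORT B =====
-- Source B: for-loop appending to an accumulator list
def process_alt (vals : List Int) (x : Int) : List Int :=
  vals.foldl (fun result v => result ++ [if v > x then 0 else v]) []

-- ===== PRECONDITION & SPEC =====
def Spec_process (vals : List Int) (x : Int) (out : List Int) : Prop := out = process_alt vals x
instance (vals : List Int) (x : Int) (out : List Int) : Decidable (Spec_process vals x out) := by unfold Spec_process; infer_instance

-- ===== CLAIM (what is proved, stated in full; the proofs are below) =====
def Claim_equal_process : Prop := ∀ (vals : List Int) (x : Int), Dom_process vals x → Spec_process vals x (process vals x)

-- ===== LEMMAS AND PROOFS =====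
-- loop invariant: folding from accumulator acc yields acc ++ process vals x
theorem process_alt_acc (vals : List Int) (x : Int) (acc : List Int) :
    vals.foldl (fun result v => result ++ [if v > x then 0 else v]) acc
      = acc ++ process vals x := by
  induction vals generalizing acc with
  | nil => simp [process]
  | cons v rest ih =>
    simp only [List.foldl, process, ih]
    split <;> simp

-- ===== VERDICT (by name: the statement is the Claim_ definition above) =====
theorem process_spec : Claim_equal_process := by
  intro vals x _
  unfold Spec_process process_alt
  simpa using (process_alt_acc vals x []).symm
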